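-- pv_equiv track=rewrite | github.com/Valenn31/App-CDG-TECH | cdgtech_app/proyecto--clase2/mi_proyecto/mi_app/models.py | obtener_estado_anterior
-- ===== SOURCE A (Python) =====
-- FLUJO_ESTADOS = [
--     "por revisar",
--     "en revision",
--     "presupuestado",
--     "aceptado",
--     "no aceptado",
--     "esperando repuestos",
--     "en reparacion",
--     "finalizado",
--     "entregado",  # camino normal
--     "cancelado",  # camino alternativo
--     "entregado (cancelado)",  # camino alternativo
-- ]
--
-- def obtener_estado_anterior(actual):
--     anterior = None
--     for paso in FLUJO_ESTADOS:
--         if isinstance(paso, str):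
--             if paso == actual:
--                 return anterior
--             anterior = paso
--         elif isinstance(paso, dict):
--             for clave, opciones in paso.items():
--                 if isinstance(opciones, str):
--                     if opciones == actual:
--                         return clave
--                 elif isinstance(opciones, list):
--                     if actual in opciones:
--                         return clave
--     return None
-- ===== SOURCE B (Python) =====
-- FLUJO_ESTADOS = [
--     "por revisar",
--     "en revision",
--     "presupuestado",
--     "aceptado",
--     "no aceptado",
--     "esperando repuestos",
--     "en reparacion",
--     "finalizado",
--     "entregado",  # camino normal
--     "cancelado",  # camino alternativo
--     "entregado (cancelado)",  # camino alternativo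
-- ]
--
-- # Precomputed predecessor table: each state maps to the state before it (None for the first).
-- PRED = {s: (None if i == 0 else FLUJO_ESTADOS[i - 1]) for i, s in enumerate(FLUJO_ESTADOS)}
--
-- def obtener_estado_anterior(actual):
--     return PRED.get(actual)
-- ===== Notes on version B (the rewrite author's own statement) =====
-- stated objective: simpler
-- what changed: Replaced the linear scan carrying a running predecessor variable (plus dead isinstance/dict branches) with a precomputed predecessor table built once at module load and a single dict lookup.
import Mathlib
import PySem

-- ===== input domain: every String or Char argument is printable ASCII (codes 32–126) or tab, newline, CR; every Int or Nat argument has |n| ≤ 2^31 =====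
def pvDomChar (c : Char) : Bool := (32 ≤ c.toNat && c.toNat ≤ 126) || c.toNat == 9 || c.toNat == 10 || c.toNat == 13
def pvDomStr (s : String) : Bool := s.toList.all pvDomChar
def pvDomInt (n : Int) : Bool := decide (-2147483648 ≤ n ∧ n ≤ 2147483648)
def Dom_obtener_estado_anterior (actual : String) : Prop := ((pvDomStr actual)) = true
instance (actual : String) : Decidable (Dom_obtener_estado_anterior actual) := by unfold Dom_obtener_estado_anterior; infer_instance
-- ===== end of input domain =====

-- B replaces A's accumulator scan with a precomputed predecessor table and one lookup (objective: simpler).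

-- ===== PORT A =====
def FLUJO_ESTADOS : List String :=
  ["por revisar", "en revision", "presupuestado", "aceptado", "no aceptado",
   "esperando repuestos", "en reparacion", "finalizado", "entregado",
   "cancelado", "entregado (cancelado)"]

-- the loop: carries 'anterior'; every element of FLUJO_ESTADOS is a str, so only the
-- isinstance(paso, str) branch of A is reachable and the dict branch is dead code.
def pvLoopA (anterior : Option String) (pasos : List String) (actual : String) : Option String :=
  match pasos with
  | [] => none
  | paso :: rest => if paso = actual then anterior else pvLoopA (some paso) rest actual

def obtener_estado_anterior (actual : String) : Option String :=
  pvLoopA none FLUJO_ESTADOS actual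

-- ===== PORT B =====
-- PRED = {s: (None if i==0 else FLUJO_ESTADOS[i-1]) for i, s in enumerate(FLUJO_ESTADOS)}
def PRED : PySem.Dict String (Option String) :=
  (PySem.List.enumerate FLUJO_ESTADOS).foldl
    (fun d is =>
      d.insert is.2 (if is.1 = 0 then none else (PySem.List.pyGet? FLUJO_ESTADOS (is.1 - 1))))
    PySem.Dict.empty

def obtener_estado_anterior_alt (actual : String) : Option String :=
  match PRED.get? actual with
  | none => none
  | some v => v

-- ===== PRECONDITION & SPEC =====
def Spec_obtener_estado_anterior (actual : String) (out : Option String) : Prop := out = obtener_estado_anterior_alt actual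
instance (actual : String) (out : Option String) : Decidable (Spec_obtener_estado_anterior actual out) := by unfold Spec_obtener_estado_anterior; infer_instance

-- ===== CLAIM (what is proved, stated in full; the proofs are below) =====
def Claim_equal_obtener_estado_anterior : Prop := ∀ (actual : String), Dom_obtener_estado_anterior actual → Spec_obtener_estado_anterior actual (obtener_estado_anterior actual)

-- ===== LEMMAS AND PROOFS =====

-- ===== VERDICT (by name: the statement is the Claim_ definition above) =====
set_option maxHeartbeats 2000000 in
theorem obtener_estado_anterior_spec : Claim_equal_obtener_estado_anterior := by
  intro actual _
  unfold Spec_obtener_estado_anterior obtener_estado_anterior obtener_estado_anterior_alt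
  have hP : PRED = PySem.Dict.mk [("por revisar", none), ("en revision", some "por revisar"), ("presupuestado", some "en revision"), ("aceptado", some "presupuestado"), ("no aceptado", some "aceptado"), ("esperando repuestos", some "no aceptado"), ("en reparacion", some "esperando repuestos"), ("finalizado", some "en reparacion"), ("entregado", some "finalizado"), ("cancelado", some "entregado"), ("entregado (cancelado)", some "cancelado")] := by decide
  rw [hP]
  simp only [FLUJO_ESTADOS, pvLoopA, PySem.Dict.get?_mk_cons, beq_iff_eq]
  split_ifs <;> simp [PySem.Dict.get?]
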